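-- pv_equiv track=rewrite | github.com/2asyim/- | 세무도우미 - 복사본/utils/formatters.py | format_biznum
-- ===== SOURCE A (Python) =====
-- def format_biznum(text):
--     """사업자등록번호 포맷팅: '000-00-00000'"""
--     # 하이픈 제거
--     text = text.replace("-", "")
--
--     # 숫자만 필터링
--     text = ''.join(char for char in text if char.isdigit())
--
--     # 최대 10자리로 제한
--     if len(text) > 10:
--         text = text[:10]
--
--     # 하이픈 추가
--     if len(text) > 5:
--         text = f"{text[:3]}-{text[3:5]}-{text[5:10]}"
--     elif len(text) > 3:
--         text = f"{text[:3]}-{text[3:5]}"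
--
--     return text
-- ===== SOURCE B (Python) =====
-- def format_biznum(text):
--     out = []
--     n = 0
--     for ch in text:
--         if ch.isdigit():
--             if n == 10:
--                 break
--             if n == 3 or n == 5:
--                 out.append('-')
--             out.append(ch)
--             n += 1
--     return ''.join(out)
-- ===== Notes on version B (the rewrite author's own statement) =====
-- stated objective: simpler
-- what changed: Replaces A's replace/filter/truncate/length-branch-and-slice pipeline with a single pass over the input that collects digits, breaks after the 10th, and inserts a hyphen just before the 4th and 6th digit.
import Mathlib
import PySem

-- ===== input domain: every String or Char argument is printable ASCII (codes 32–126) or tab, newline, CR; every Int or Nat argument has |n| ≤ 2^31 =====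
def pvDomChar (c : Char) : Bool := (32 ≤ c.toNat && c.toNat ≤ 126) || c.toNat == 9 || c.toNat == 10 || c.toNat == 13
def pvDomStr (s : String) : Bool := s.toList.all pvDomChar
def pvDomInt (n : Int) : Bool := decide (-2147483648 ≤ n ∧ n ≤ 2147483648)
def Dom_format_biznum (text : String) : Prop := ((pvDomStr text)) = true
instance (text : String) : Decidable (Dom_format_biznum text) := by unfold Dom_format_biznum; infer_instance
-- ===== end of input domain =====

-- B replaces A's length-branching and slicing with a single pass over the digits that
-- inserts a hyphen before the 4th and 6th digit (objective: simpler, one traversal, no slices).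


-- ===== PORT A =====
def format_biznum (text : String) : String :=
  -- text = text.replace("-", "")
  let t1 := PySem.Chars.replace text.toList ['-'] []
  -- text = ''.join(char for char in text if char.isdigit())
  let t2 := t1.filter PySem.Chars.isdigit
  -- if len(text) > 10: text = text[:10]
  let t3 := if t2.length > 10 then PySem.List.slice t2 none (some 10) else t2
  -- hyphen branches (f-string concatenation = list append)
  let t4 :=
    if t3.length > 5 then
      PySem.List.slice t3 none (some 3) ++ ['-'] ++ PySem.List.slice t3 (some 3) (some 5)
        ++ ['-'] ++ PySem.List.slice t3 (some 5) (some 10)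
    else if t3.length > 3 then
      PySem.List.slice t3 none (some 3) ++ ['-'] ++ PySem.List.slice t3 (some 3) (some 5)
    else t3
  String.ofList t4

-- ===== PORT B =====
-- the for-loop of Source B: `out` is built front-to-back, `n` counts appended digits, `break` at n = 10
def fbAltGo : List Char → Nat → List Char
  | [], _ => []
  | c :: rest, n =>
    if PySem.Chars.isdigit c then
      if n = 10 then []
      else (if n = 3 || n = 5 then ['-', c] else [c]) ++ fbAltGo rest (n + 1)
    else fbAltGo rest n

def format_biznum_alt (text : String) : String :=
  String.ofList (fbAltGo text.toList 0)

-- ===== PRECONDITION & SPEC =====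
def Spec_format_biznum (text : String) (out : String) : Prop := out = format_biznum_alt text
instance (text : String) (out : String) : Decidable (Spec_format_biznum text out) := by unfold Spec_format_biznum; infer_instance

-- ===== CLAIM (what is proved, stated in full; the proofs are below) =====
def Claim_equal_format_biznum : Prop := ∀ (text : String), Dom_format_biznum text → Spec_format_biznum text (format_biznum text)

-- ===== LEMMAS AND PROOFS =====

-- digits-only core of the B loop (proof helper): fbAltGo after the isdigit filter
def fbD : List Char → Nat → List Char
  | [], _ => []
  | c :: rest, n =>
    if n = 10 then []
    else (if n = 3 || n = 5 then ['-', c] else [c]) ++ fbD rest (n + 1)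

theorem fbAltGo_eq_fbD (l : List Char) (n : Nat) :
    fbAltGo l n = fbD (l.filter PySem.Chars.isdigit) n := by
  induction l generalizing n with
  | nil => rfl
  | cons c t ih =>
    by_cases hc : PySem.Chars.isdigit c
    · simp [fbAltGo, fbD, hc, ih]
    · simp [fbAltGo, hc, ih]

theorem fbD_take (l : List Char) (n : Nat) (hn : n ≤ 10) :
    fbD l n = fbD (l.take (10 - n)) n := by
  induction l generalizing n with
  | nil => simp
  | cons c t ih =>
    by_cases h : n = 10
    · subst h; simp [fbD]
    · have h1 : 1 ≤ 10 - n := by omega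
      rw [show (10 - n) = (10 - (n + 1)) + 1 by omega]
      simp only [List.take_succ_cons, fbD, if_neg h]
      rw [ih (n + 1) (by omega)]

-- replace(s, "-", "") removes exactly the hyphens
theorem replace_go_dash (l : List Char) :
    ∀ (fuel : Nat) (acc : List Char), l.length ≤ fuel →
      PySem.Chars.replace.go ['-'] [] fuel l acc = acc.reverse ++ l.filter (fun c => c ≠ '-') := by
  induction l with
  | nil =>
    intro fuel acc _
    cases fuel <;> rw [PySem.Chars.replace.go] <;> simp
  | cons c t ih =>
    intro fuel acc hf
    cases fuel with
    | zero => simp at hf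
    | succ m =>
      rw [PySem.Chars.replace.go]
      simp only [List.length_cons] at hf
      by_cases hc : c = '-'
      · subst hc
        simp only [List.isPrefixOf, BEq.rfl, Bool.true_and,
          if_true, List.reverse_nil, List.nil_append, List.length_cons, List.length_nil,
          List.drop_succ_cons, List.drop_zero]
        rw [ih m acc (by omega)]
        simp
      · have hpre : (['-'].isPrefixOf (c :: t)) = false := by
          simp only [List.isPrefixOf, Bool.and_true]
          exact beq_eq_false_iff_ne.mpr (Ne.symm hc)
        rw [if_neg (by rw [hpre]; simp)]
        rw [ih m (c :: acc) (by omega)]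
        simp [hc]

theorem filter_isdigit_replace (l : List Char) :
    (PySem.Chars.replace l ['-'] []).filter PySem.Chars.isdigit = l.filter PySem.Chars.isdigit := by
  rw [PySem.Chars.replace]
  simp only [List.isEmpty_cons, if_neg (by decide : ¬ (false = true))]
  rw [replace_go_dash l l.length [] (le_refl _)]
  simp only [List.reverse_nil, List.nil_append, List.filter_filter]
  apply List.filter_congr
  intro c _
  by_cases hc : c = '-'
  · subst hc; decide
  · simp [hc]

-- the heart: on a list of at most 10 characters, the B loop body equals A's slice formatting
theorem fbD_eq_slices (l : List Char) (hl : l.length ≤ 10) :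
    fbD l 0 =
      (if l.length > 5 then
        PySem.List.slice l none (some 3) ++ ['-'] ++ PySem.List.slice l (some 3) (some 5)
          ++ ['-'] ++ PySem.List.slice l (some 5) (some 10)
      else if l.length > 3 then
        PySem.List.slice l none (some 3) ++ ['-'] ++ PySem.List.slice l (some 3) (some 5)
      else l) := by
  obtain _|⟨a,_|⟨b,_|⟨c,_|⟨d,_|⟨e,_|⟨f,_|⟨g,_|⟨h,_|⟨i,_|⟨j,rest⟩⟩⟩⟩⟩⟩⟩⟩⟩⟩ := l
  case cons.cons.cons.cons.cons.cons.cons.cons.cons.cons =>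
    simp only [List.length_cons] at hl
    have h0 : rest.length = 0 := by omega
    rw [List.length_eq_zero_iff] at h0
    subst h0
    simp [fbD, PySem.List.slice, PySem.List.clampIdx]
  all_goals simp [fbD, PySem.List.slice, PySem.List.clampIdx]

-- ===== VERDICT (by name: the statement is the Claim_ definition above) =====
theorem format_biznum_spec : Claim_equal_format_biznum := by
  intro text _
  simp only [Spec_format_biznum, format_biznum, format_biznum_alt]
  rw [fbAltGo_eq_fbD, fbD_take _ 0 (by omega)]
  rw [filter_isdigit_replace]
  set d := text.toList.filter PySem.Chars.isdigit with hd
  have hslice : PySem.List.slice d none (some 10) = d.take 10 := by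
    simp [PySem.List.slice, PySem.List.clampIdx]
  have ht3 : (if d.length > 10 then PySem.List.slice d none (some 10) else d) = d.take 10 := by
    by_cases h : d.length > 10
    · simp [h, hslice]
    · simp [h, List.take_of_length_le (show d.length ≤ 10 by omega)]
  simp only [ht3, Nat.sub_zero]
  rw [fbD_eq_slices (d.take 10) (by simp)]
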